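-- pv_equiv track=rewrite | github.com/tharindupr/hackerrank_warmups | Cypher.py | convert
-- ===== SOURCE A (Python) =====
-- def convert(arr):
--     b=max(arr)+1
--     i=0
--     summ=0
--     arr=reversed(arr)
--     for x in arr:
--         summ=summ+(x*(b**i))
--         i+=1
--     return summ
-- ===== SOURCE B (Python) =====
-- def convert(arr):
--     b = max(arr) + 1
--     n = len(arr)
--     summ = 0
--     i = 0
--     while i < n:
--         summ = summ * b + arr[i]
--         i += 1
--     return summ
-- ===== Notes on version B (the rewrite author's own statement) =====
-- stated objective: faster
-- what changed: Replaces A's reversed-order loop with a per-element power b**i (recomputed each step) by a single left-to-right index-driven Horner pass summ = summ*b + arr[i], no powers and no reversal.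
import Mathlib
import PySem

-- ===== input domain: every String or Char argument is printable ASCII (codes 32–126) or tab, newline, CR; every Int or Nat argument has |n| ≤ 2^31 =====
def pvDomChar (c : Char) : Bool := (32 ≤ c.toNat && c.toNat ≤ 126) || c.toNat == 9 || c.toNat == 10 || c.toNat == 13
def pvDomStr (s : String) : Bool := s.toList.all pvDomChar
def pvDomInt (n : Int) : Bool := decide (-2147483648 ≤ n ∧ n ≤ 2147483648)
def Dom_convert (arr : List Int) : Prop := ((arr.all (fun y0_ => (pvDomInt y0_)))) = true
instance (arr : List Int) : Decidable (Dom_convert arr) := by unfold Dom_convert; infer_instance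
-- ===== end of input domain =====

-- B replaces A's reversed-iteration with per-element power b**i by one left-to-right, index-driven Horner pass: O(n) multiplications instead of O(n^2).

-- ===== PORT A =====
-- summ = summ + x * b**i over reversed(arr), i counting up
def convert (arr : List Int) : Int :=
  match PySem.List.max? arr (fun x => x) with
  | none => 0  -- unreachable: Python's max([]) raises ValueError, excluded by Pre_convert
  | some m =>
    let b := m + 1
    (arr.reverse.foldl (fun (p : Int × Nat) x => (p.1 + x * b ^ p.2, p.2 + 1)) (0, 0)).1

-- ===== PORT B =====
-- while i < n: summ = summ*b + arr[i]; i += 1   (index loop as structural recursion on n - i)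
def convertAltLoop (b : Int) (arr : List Int) (n : Nat) (i : Nat) (summ : Int) : Int :=
  if _h : i < n then
    convertAltLoop b arr n (i + 1) (summ * b + arr.getD i 0)
  else
    summ
termination_by n - i

def convert_alt (arr : List Int) : Int :=
  match PySem.List.max? arr (fun x => x) with
  | none => 0  -- unreachable: max([]) raises, excluded by Pre_convert
  | some m =>
    let b := m + 1
    convertAltLoop b arr arr.length 0 0

-- ===== PRECONDITION & SPEC =====
-- Pre_ excludes the empty list, on which max(arr) raises ValueError in both A and B.
def Pre_convert (arr : List Int) : Prop := arr ≠ []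
instance (arr : List Int) : Decidable (Pre_convert arr) := by unfold Pre_convert; infer_instance
def pvWitness_convert : List Int := [1, 0, 2]

def Spec_convert (arr : List Int) (out : Int) : Prop := out = convert_alt arr
instance (arr : List Int) (out : Int) : Decidable (Spec_convert arr out) := by unfold Spec_convert; infer_instance

-- ===== CLAIM =====
def Claim_equal_convert : Prop := ∀ (arr : List Int), Dom_convert arr → Pre_convert arr → Spec_convert arr (convert arr)

-- ===== LEMMAS AND PROOFS =====

-- value of a digit list, least-significant digit first
def pvPoly (b : Int) : List Int → Int
  | [] => 0
  | x :: t => x + b * pvPoly b t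

theorem pvPoly_append (b : Int) (m : List Int) (x : Int) :
    pvPoly b (m ++ [x]) = pvPoly b m + x * b ^ m.length := by
  induction m with
  | nil => simp [pvPoly]
  | cons y t ih => simp [pvPoly, ih, List.length_cons]; ring

theorem loopA_eq (b : Int) (l : List Int) : ∀ (s : Int) (i : Nat),
    (l.foldl (fun (p : Int × Nat) x => (p.1 + x * b ^ p.2, p.2 + 1)) (s, i)).1
      = s + b ^ i * pvPoly b l := by
  induction l with
  | nil => intro s i; simp [pvPoly]
  | cons x t ih =>
    intro s i
    simp only [List.foldl_cons, ih, pvPoly, pow_succ]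
    ring

theorem horner_foldl_eq (b : Int) (l : List Int) : ∀ (a : Int),
    l.foldl (fun summ x => summ * b + x) a = a * b ^ l.length + pvPoly b l.reverse := by
  induction l with
  | nil => intro a; simp [pvPoly]
  | cons x t ih =>
    intro a
    simp only [List.foldl_cons, ih, List.reverse_cons, pvPoly_append,
      List.length_reverse, List.length_cons, pow_succ]
    ring

-- the index loop of B computes the Horner fold over the remaining suffix
theorem convertAltLoop_eq_foldl (b : Int) (arr : List Int) :
    ∀ (i : Nat) (s : Int),
      convertAltLoop b arr arr.length i s
        = (arr.drop i).foldl (fun summ x => summ * b + x) s := by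
  intro i
  induction hfuel : arr.length - i using Nat.strong_induction_on generalizing i with
  | _ fuel ih =>
    intro s
    rw [convertAltLoop]
    split
    · next h =>
      rw [List.drop_eq_getElem_cons h, List.foldl_cons,
        ih (arr.length - (i + 1)) (by omega) (i + 1) rfl]
      congr 2
      exact List.getD_eq_getElem arr 0 h
    · next h =>
      rw [List.drop_eq_nil_of_le (by omega), List.foldl_nil]

-- ===== VERDICT =====
theorem convert_spec : Claim_equal_convert := by
  intro arr _ hpre
  unfold Spec_convert convert convert_alt
  cases harr : arr with
  | nil => exact absurd harr hpre
  | cons x t =>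
    simp only [PySem.List.max?_id_cons]
    rw [loopA_eq, convertAltLoop_eq_foldl, List.drop_zero, horner_foldl_eq]
    simp
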